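-- pv_equiv track=rewrite | github.com/MrBrantCode/unitest_baseline | mut_generate/mist_train_cf/cf_98775/solution.py | highest_price
-- ===== SOURCE A (Python) =====
-- def highest_price(table):
--     highest_price = 0
--     corresponding_products = []
--     for row in table:
--         product, price = row
--         if price > highest_price:
--             highest_price = price
--             corresponding_products = [product]
--         elif price == highest_price:
--             corresponding_products.append(product)
--     return corresponding_products
-- ===== SOURCE B (Python) =====
-- def highest_price(table):
--     m = 0
--     for _, price in table:
--         if price > m:
--             m = price
--     return [product for product, price in table if price == m]
-- ===== Notes on version B (the rewrite author's own statement) =====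
-- stated objective: simpler
-- what changed: Replaces the single stateful pass that rebuilds/resets a candidate list on each new maximum with a two-phase decomposition: first compute the maximum price (floored at 0 like A's initializer), then collect matching products with one comprehension.
import Mathlib
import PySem

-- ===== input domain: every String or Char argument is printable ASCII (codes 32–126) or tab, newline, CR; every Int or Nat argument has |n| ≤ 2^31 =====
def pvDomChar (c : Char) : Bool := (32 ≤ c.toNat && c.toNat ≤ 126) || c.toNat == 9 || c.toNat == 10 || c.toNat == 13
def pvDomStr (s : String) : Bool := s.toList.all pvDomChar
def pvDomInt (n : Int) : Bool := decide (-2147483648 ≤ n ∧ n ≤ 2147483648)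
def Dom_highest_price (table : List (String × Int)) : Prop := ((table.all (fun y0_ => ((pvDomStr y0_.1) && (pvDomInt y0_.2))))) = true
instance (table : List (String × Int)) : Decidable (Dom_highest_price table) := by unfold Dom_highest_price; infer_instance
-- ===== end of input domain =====

-- B replaces A's single stateful reset-on-new-max pass with compute-max-then-filter (simpler decomposition).


-- ===== PORT A =====
-- one pass; state = (highest_price, corresponding_products)
def highest_price (table : List (String × Int)) : List String :=
  (table.foldl
    (fun (s : Int × List String) row =>
      if row.2 > s.1 then (row.2, [row.1])
      else if row.2 == s.1 then (s.1, s.2 ++ [row.1])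
      else s)
    (0, [])).2

-- ===== PORT B =====
-- pass 1: max price floored at 0
def hpMax (table : List (String × Int)) : Int :=
  table.foldl (fun m row => if row.2 > m then row.2 else m) 0

-- pass 2: comprehension collecting products at the max
def highest_price_alt (table : List (String × Int)) : List String :=
  (table.filter (fun row => row.2 == hpMax table)).map Prod.fst

-- ===== PRECONDITION & SPEC =====
def Spec_highest_price (table : List (String × Int)) (out : List String) : Prop := out = highest_price_alt table
instance (table : List (String × Int)) (out : List String) : Decidable (Spec_highest_price table out) := by unfold Spec_highest_price; infer_instance

-- ===== CLAIM (what is proved, stated in full; the proofs are below) =====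
def Claim_equal_highest_price : Prop := ∀ (table : List (String × Int)), Dom_highest_price table → Spec_highest_price table (highest_price table)

-- ===== LEMMAS AND PROOFS =====
def hpStep : Int × List String → String × Int → Int × List String :=
  fun s row =>
    if row.2 > s.1 then (row.2, [row.1])
    else if row.2 == s.1 then (s.1, s.2 ++ [row.1])
    else s

def hpMaxFrom (table : List (String × Int)) (h : Int) : Int :=
  table.foldl (fun m row => if row.2 > m then row.2 else m) h

theorem hpMaxFrom_ge (table : List (String × Int)) (h : Int) : h ≤ hpMaxFrom table h := by
  induction table generalizing h with
  | nil => simp [hpMaxFrom]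
  | cons r t ih =>
      simp only [hpMaxFrom, List.foldl_cons]
      by_cases hc : r.2 > h
      · simp only [if_pos hc]
        exact le_trans (le_of_lt hc) (ih r.2)
      · simp only [if_neg hc]; exact ih h

theorem hpMaxFrom_cons (r : String × Int) (t : List (String × Int)) (h : Int) :
    hpMaxFrom (r :: t) h = hpMaxFrom t (if r.2 > h then r.2 else h) := rfl

theorem hp_invariant (table : List (String × Int)) (h : Int) (acc : List String) :
    (table.foldl hpStep (h, acc)).2 =
      (if hpMaxFrom table h = h then acc else []) ++
        (table.filter (fun row => row.2 == hpMaxFrom table h)).map Prod.fst := by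
  induction table generalizing h acc with
  | nil => simp [hpMaxFrom]
  | cons r t ih =>
      simp only [List.foldl_cons]
      by_cases h1 : r.2 > h
      · have e1 : hpStep (h, acc) r = (r.2, [r.1]) := by simp [hpStep, h1]
        have e2 : hpMaxFrom (r :: t) h = hpMaxFrom t r.2 := by
          rw [hpMaxFrom_cons, if_pos h1]
        rw [e1, e2, ih, List.filter_cons]
        have hge := hpMaxFrom_ge t r.2
        have hM : hpMaxFrom t r.2 ≠ h := by omega
        rw [if_neg hM]
        simp only [beq_iff_eq]
        by_cases h2 : r.2 = hpMaxFrom t r.2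
        · rw [if_pos h2, if_pos h2.symm]; simp
        · rw [if_neg h2, if_neg (fun e => h2 e.symm)]
      · have e2 : hpMaxFrom (r :: t) h = hpMaxFrom t h := by
          rw [hpMaxFrom_cons, if_neg h1]
        by_cases h2 : r.2 = h
        · have e1 : hpStep (h, acc) r = (h, acc ++ [r.1]) := by simp [hpStep, h2]
          rw [e1, e2, ih, List.filter_cons]
          simp only [beq_iff_eq]
          by_cases h3 : hpMaxFrom t h = h
          · rw [if_pos h3, if_pos h3, if_pos (h2.trans h3.symm)]; simp
          · rw [if_neg h3, if_neg h3, if_neg (fun e => h3 (e.symm.trans h2))]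
        · have e1 : hpStep (h, acc) r = (h, acc) := by simp [hpStep, h1, h2]
          rw [e1, e2, ih, List.filter_cons]
          simp only [beq_iff_eq]
          have hge := hpMaxFrom_ge t h
          rw [if_neg (show ¬ r.2 = hpMaxFrom t h by intro e; omega)]

-- ===== VERDICT (by name: the statement is the Claim_ definition above) =====
theorem highest_price_spec : Claim_equal_highest_price := by
  intro table _
  show highest_price table = highest_price_alt table
  have inv := hp_invariant table 0 []
  have e : highest_price table = (List.foldl hpStep (0, []) table).2 := rfl
  rw [e, inv]
  simp [highest_price_alt, hpMax, hpMaxFrom]
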